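-- pv_equiv track=rewrite | github.com/firearc7/interview-assist | src/question_module.py | parse_questions_from_text
-- ===== SOURCE A (Python) =====
-- def parse_questions_from_text(text_response):
--     """
--     Parses a block of text from LLM into a list of questions.
--     Assumes questions are separated by newlines.
--     """
--     if not text_response:
--         return []
--     # Simple split by newline, removing empty lines and stripping whitespace
--     questions = [q.strip() for q in text_response.split('\n') if q.strip()]
--     # Further refinement might be needed based on LLM output format
--     # e.g., removing numbering like "1. Question text"
--     cleaned_questions = []
--     for q in questions:
--         if q.startswith(tuple(f"{i}." for i in range(1, 10))): # "1.", "2." etc.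
--             cleaned_questions.append(q.split('.', 1)[1].strip())
--         elif q.startswith(tuple(f"{i})" for i in range(1, 10))): # "1)", "2)" etc.
--             cleaned_questions.append(q.split(')', 1)[1].strip())
--         else:
--             cleaned_questions.append(q)
--     return cleaned_questions
-- ===== SOURCE B (Python) =====
-- def parse_questions_from_text(text_response):
--     """Single character-level scan (a small state machine): lines, stripping
--     and empty-line skipping all happen in one pass over the characters,
--     instead of split('\n') + per-line strip/startswith passes."""
--     out = []
--     word = ''   # stripped content of the current line seen so far
--     pend = ''   # whitespace run pending between words (dropped if trailing)
--     for ch in text_response: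
--         if ch == '\n':
--             if word:
--                 out.append(_strip_marker(word))
--             word = ''
--             pend = ''
--         elif ch.isspace():
--             if word:
--                 pend += ch
--         else:
--             word += pend + ch
--             pend = ''
--     if word:
--         out.append(_strip_marker(word))
--     return out
--
--
-- def _strip_marker(q):
--     if len(q) >= 2 and q[0] in '123456789' and q[1] in '.)':
--         return q[2:].lstrip()
--     return q
-- ===== Notes on version B (the rewrite author's own statement) =====
-- stated objective: alternative
-- what changed: A's staged pipeline (split(' '), a strip/filter comprehension over the lines, then a loop testing nine startswith prefixes and re-splitting each line) is replaced by a single character-level state machine that scans the text once, building each stripped line incrementally (pending-whitespace buffer) and flushing non-empty lines, with the numbering marker removed by direct inspection of the first two characters.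
import Mathlib
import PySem

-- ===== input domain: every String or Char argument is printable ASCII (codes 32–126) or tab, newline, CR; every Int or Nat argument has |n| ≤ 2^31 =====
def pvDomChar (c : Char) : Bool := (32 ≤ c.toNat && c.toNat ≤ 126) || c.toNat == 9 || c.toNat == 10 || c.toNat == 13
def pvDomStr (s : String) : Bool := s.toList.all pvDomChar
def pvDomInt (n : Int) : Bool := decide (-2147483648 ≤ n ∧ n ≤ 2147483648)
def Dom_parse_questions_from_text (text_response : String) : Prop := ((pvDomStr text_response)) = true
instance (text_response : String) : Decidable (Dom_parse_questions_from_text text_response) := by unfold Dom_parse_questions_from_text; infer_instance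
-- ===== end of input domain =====

-- B replaces A's staged pipeline (split + strip/filter comprehension + nine-prefix
-- startswith loop with a re-split) by one character-level state machine over the text.

-- ===== PORT A =====
def parse_questions_from_text (text_response : String) : List String :=
  if text_response = "" then []
  else
    -- questions = [q.strip() for q in text_response.split('\n') if q.strip()]
    let questions :=
      ((((PySem.Str.split? text_response "\n").getD []).filter
          (fun q => PySem.Str.strip q ≠ "")).map PySem.Str.strip)
    questions.foldl (fun cleaned_questions q =>
      if ((PySem.List.pyRange 1 10 1).map (fun i => PySem.Int.toStr i ++ ".")).any
           (fun p => PySem.Str.startswith q p) then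
        -- q.split('.', 1)[1].strip(); index [1] always exists because q starts with "i."
        cleaned_questions ++
          [PySem.Str.strip ((((PySem.Str.splitMax? q "." 1).getD [])[1]?).getD "")]
      else if ((PySem.List.pyRange 1 10 1).map (fun i => PySem.Int.toStr i ++ ")")).any
           (fun p => PySem.Str.startswith q p) then
        cleaned_questions ++
          [PySem.Str.strip ((((PySem.Str.splitMax? q ")" 1).getD [])[1]?).getD "")]
      else
        cleaned_questions ++ [q]) []

-- ===== PORT B =====
-- _strip_marker: Python short-circuits `len(q) >= 2 and q[0] in … and q[1] in …`,
-- so the `.getD ' '` defaults on the two indexings are unreachable.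
def pvStripMarker (q : List Char) : String :=
  if 2 ≤ PySem.Chars.len q
      ∧ PySem.Chars.isIn [(PySem.List.pyGet? q 0).getD ' ']
          ['1','2','3','4','5','6','7','8','9'] = true
      ∧ PySem.Chars.isIn [(PySem.List.pyGet? q 1).getD ' '] ['.', ')'] = true
  then String.ofList (PySem.Chars.lstrip (PySem.List.slice q (some 2) none))
  else String.ofList q

-- the `for ch in text_response` state machine of Source B: out, word, pend;
-- the base case is the trailing `if word: out.append(_strip_marker(word))`
def pvBGo : List Char → List String → List Char → List Char → List String
  | [], out, word, _pend => if word ≠ [] then out ++ [pvStripMarker word] else out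
  | c :: cs, out, word, pend =>
    if c = '\n' then
      pvBGo cs (if word ≠ [] then out ++ [pvStripMarker word] else out) [] []
    else if PySem.Chars.isspace c = true then
      pvBGo cs out word (if word ≠ [] then pend ++ [c] else pend)
    else
      pvBGo cs out (word ++ (pend ++ [c])) []

def parse_questions_from_text_alt (text_response : String) : List String :=
  pvBGo text_response.toList [] [] []

-- ===== PRECONDITION & SPEC =====
def Spec_parse_questions_from_text (text_response : String) (out : List String) : Prop := out = parse_questions_from_text_alt text_response
instance (text_response : String) (out : List String) : Decidable (Spec_parse_questions_from_text text_response out) := by unfold Spec_parse_questions_from_text; infer_instance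

-- ===== CLAIM (what is proved, stated in full; the proofs are below) =====
def Claim_equal_parse_questions_from_text : Prop := ∀ (text_response : String), Dom_parse_questions_from_text text_response → Spec_parse_questions_from_text text_response (parse_questions_from_text text_response)

-- ===== LEMMAS AND PROOFS =====

-- A's per-line cleaning step, factored out of its fold body
def pvCleanA (q : String) : String :=
  if ((PySem.List.pyRange 1 10 1).map (fun i => PySem.Int.toStr i ++ ".")).any
       (fun p => PySem.Str.startswith q p) then
    PySem.Str.strip ((((PySem.Str.splitMax? q "." 1).getD [])[1]?).getD "")
  else if ((PySem.List.pyRange 1 10 1).map (fun i => PySem.Int.toStr i ++ ")")).any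
       (fun p => PySem.Str.startswith q p) then
    PySem.Str.strip ((((PySem.Str.splitMax? q ")" 1).getD [])[1]?).getD "")
  else q

-- splitOn with a single-character separator, written as a plain accumulator recursion
def pvSSplit (c : Char) : List Char → List Char → List (List Char)
  | pre, [] => [pre]
  | pre, x :: r => if x = c then pre :: pvSSplit c [] r else pvSSplit c (pre ++ [x]) r

-- A's whole pipeline, as a filterMap over the raw lines
def pvResA (ls : List (List Char)) : List String :=
  ls.filterMap (fun l => if PySem.Chars.strip l = [] then none
    else some (pvCleanA (String.ofList (PySem.Chars.strip l))))

-- B's result, as a filterMap over the raw lines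
def pvResB (ls : List (List Char)) : List String :=
  ls.filterMap (fun l => if PySem.Chars.strip l = [] then none
    else some (pvStripMarker (PySem.Chars.strip l)))

lemma pvGo_eq (c : Char) : ∀ (fuel : Nat) (l cur : List Char) (acc : List (List Char)),
    l.length < fuel →
    PySem.Chars.splitOn.go [c] fuel l cur acc = acc.reverse ++ pvSSplit c cur.reverse l := by
  intro fuel
  induction fuel with
  | zero => intro l cur acc h; exact absurd h (Nat.not_lt_zero _)
  | succ n ih =>
    intro l cur acc h
    cases l with
    | nil => simp [PySem.Chars.splitOn.go, pvSSplit]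
    | cons x rest =>
      have hlt : rest.length < n := by simp at h; omega
      by_cases hx : x = c
      · subst hx
        rw [show PySem.Chars.splitOn.go [x] (n+1) (x::rest) cur acc
              = PySem.Chars.splitOn.go [x] n rest [] (cur.reverse :: acc) from by
            simp [PySem.Chars.splitOn.go, List.isPrefixOf]]
        rw [ih rest [] (cur.reverse :: acc) hlt]
        simp [pvSSplit]
      · rw [show PySem.Chars.splitOn.go [c] (n+1) (x::rest) cur acc
              = PySem.Chars.splitOn.go [c] n rest (x :: cur) acc from by
            simp [PySem.Chars.splitOn.go, List.isPrefixOf, Ne.symm hx]]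
        rw [ih rest (x :: cur) acc hlt]
        simp [pvSSplit, hx]

lemma pvSplitOn_eq (c : Char) (l : List Char) :
    PySem.Chars.splitOn l [c] = pvSSplit c [] l := by
  rw [PySem.Chars.splitOn, pvGo_eq c (l.length + 1) l [] [] (by omega)]
  rfl

lemma pvLstrip_nil_of_allspace (j : List Char) (hj : ∀ x ∈ j, PySem.Chars.isspace x = true) :
    PySem.Chars.lstrip j = [] :=
  List.dropWhile_eq_nil_iff.mpr hj

lemma pvLstrip_allspace (j l : List Char) (hj : ∀ x ∈ j, PySem.Chars.isspace x = true) :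
    PySem.Chars.lstrip (j ++ l) = PySem.Chars.lstrip l := by
  unfold PySem.Chars.lstrip
  rw [List.dropWhile_append, List.dropWhile_eq_nil_iff.mpr hj]
  rfl

lemma pvDropWhile_allspace (a b : List Char) (ha : ∀ x ∈ a, PySem.Chars.isspace x = true) :
    List.dropWhile PySem.Chars.isspace (a ++ b) = List.dropWhile PySem.Chars.isspace b :=
  pvLstrip_allspace a b ha

lemma pvStripped_lstrip (w : List Char) (hw : PySem.Chars.strip w = w) :
    PySem.Chars.lstrip w = w := by
  have h1 : PySem.Chars.lstrip w <:+ w := List.dropWhile_suffix _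
  have h2 : (PySem.Chars.rstrip (PySem.Chars.lstrip w)).length ≤ (PySem.Chars.lstrip w).length := by
    unfold PySem.Chars.rstrip
    simpa using List.length_dropWhile_le PySem.Chars.isspace (PySem.Chars.lstrip w).reverse
  have h3 : (PySem.Chars.rstrip (PySem.Chars.lstrip w)).length = w.length := by
    rw [show PySem.Chars.rstrip (PySem.Chars.lstrip w) = PySem.Chars.strip w from rfl, hw]
  have h4 := List.IsSuffix.length_le h1
  exact List.IsSuffix.eq_of_length h1 (by omega)

lemma pvStripped_rstrip (w : List Char) (hw : PySem.Chars.strip w = w) :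
    PySem.Chars.rstrip w = w := by
  have h := pvStripped_lstrip w hw
  unfold PySem.Chars.strip at hw
  rw [h] at hw
  exact hw

lemma pvHead_dropWhile (p : Char → Bool) (l : List Char) (e : Char) (t : List Char)
    (h : List.dropWhile p l = e :: t) : p e = false := by
  induction l with
  | nil => simp at h
  | cons a l ih =>
    rw [List.dropWhile_cons] at h
    by_cases ha : p a = true
    · rw [if_pos ha] at h
      exact ih h
    · rw [if_neg ha] at h
      obtain ⟨rfl, -⟩ := List.cons_eq_cons.mp h
      simpa using ha

lemma pvHead_not_space (w : List Char) (d : Char) (w' : List Char)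
    (hw : PySem.Chars.lstrip w = w) (he : w = d :: w') : PySem.Chars.isspace d = false := by
  subst he
  exact pvHead_dropWhile _ _ _ _ hw

lemma pvRstrip_of_last (w : List Char)
    (hl : ∀ e ∈ w.getLast?, PySem.Chars.isspace e = false) : PySem.Chars.rstrip w = w := by
  unfold PySem.Chars.rstrip
  cases hrev : w.reverse with
  | nil => simp [List.reverse_eq_nil_iff.mp hrev]
  | cons e rest =>
    have he : w.getLast? = some e := by
      rw [← List.head?_reverse, hrev]
      rfl
    have hf : PySem.Chars.isspace e = false := hl e (by rw [he]; rfl)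
    rw [List.dropWhile_cons, if_neg (by simp [hf]), ← hrev, List.reverse_reverse]

lemma pvLast_not_space (w : List Char) (hw : PySem.Chars.rstrip w = w) :
    ∀ e ∈ w.getLast?, PySem.Chars.isspace e = false := by
  intro e he
  cases hrev : w.reverse with
  | nil =>
    rw [List.reverse_eq_nil_iff.mp hrev] at he
    simp at he
  | cons e' rest =>
    have he' : w.getLast? = some e' := by
      rw [← List.head?_reverse, hrev]
      rfl
    rw [he'] at he
    have hee : e' = e := by simpa using he
    by_contra hcon
    have ht : PySem.Chars.isspace e' = true := by
      rw [hee]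
      simpa using hcon
    have h1 : w = (List.dropWhile PySem.Chars.isspace rest).reverse := by
      conv_lhs => rw [← hw]
      unfold PySem.Chars.rstrip
      rw [hrev, List.dropWhile_cons, if_pos ht]
    have h2 : w.length ≤ rest.length := by
      rw [h1]
      simpa using List.length_dropWhile_le PySem.Chars.isspace rest
    have h3 : w.length = rest.length + 1 := by
      rw [show w.length = w.reverse.length from (List.length_reverse).symm, hrev]
      simp
    omega

lemma pvStrip_flush (j w p : List Char)
    (hj : ∀ x ∈ j, PySem.Chars.isspace x = true) (hp : ∀ x ∈ p, PySem.Chars.isspace x = true)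
    (hw : PySem.Chars.strip w = w) :
    PySem.Chars.strip (j ++ w ++ p) = w := by
  have hlw := pvStripped_lstrip w hw
  have hrw := pvStripped_rstrip w hw
  show PySem.Chars.rstrip (PySem.Chars.lstrip (j ++ w ++ p)) = w
  rw [List.append_assoc, pvLstrip_allspace j (w ++ p) hj]
  cases w with
  | nil =>
    rw [List.nil_append, pvLstrip_nil_of_allspace p hp]
    rfl
  | cons d w' =>
    have hd : PySem.Chars.isspace d = false := pvHead_not_space _ d w' hlw rfl
    rw [show PySem.Chars.lstrip ((d :: w') ++ p) = (d :: w') ++ p from by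
      unfold PySem.Chars.lstrip
      rw [List.cons_append, List.dropWhile_cons, if_neg (by simp [hd])]]
    have hwrev : List.dropWhile PySem.Chars.isspace (d :: w').reverse = (d :: w').reverse := by
      unfold PySem.Chars.rstrip at hrw
      calc List.dropWhile PySem.Chars.isspace (d :: w').reverse
          = ((List.dropWhile PySem.Chars.isspace (d :: w').reverse).reverse).reverse := by
            rw [List.reverse_reverse]
        _ = (d :: w').reverse := by rw [hrw]
    unfold PySem.Chars.rstrip
    rw [List.reverse_append,
      pvDropWhile_allspace _ _ (by intro x hx; exact hp x (by simpa using hx)),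
      hwrev, List.reverse_reverse]

lemma pvStrip_extend (w p : List Char) (c : Char)
    (hw : PySem.Chars.strip w = w)
    (h0 : w = [] → p = []) (hc : PySem.Chars.isspace c = false) :
    PySem.Chars.strip (w ++ p ++ [c]) = w ++ p ++ [c] := by
  show PySem.Chars.rstrip (PySem.Chars.lstrip (w ++ p ++ [c])) = w ++ p ++ [c]
  cases w with
  | nil =>
    rw [h0 rfl]
    simp only [List.nil_append]
    rw [show PySem.Chars.lstrip [c] = [c] from by
      unfold PySem.Chars.lstrip
      rw [List.dropWhile_cons, if_neg (by simp [hc])]]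
    unfold PySem.Chars.rstrip
    rw [show ([c] : List Char).reverse = [c] from rfl, List.dropWhile_cons,
      if_neg (by simp [hc])]
    rfl
  | cons d w' =>
    have hd : PySem.Chars.isspace d = false :=
      pvHead_not_space _ d w' (pvStripped_lstrip _ hw) rfl
    rw [show PySem.Chars.lstrip ((d :: w') ++ p ++ [c]) = (d :: w') ++ p ++ [c] from by
      unfold PySem.Chars.lstrip
      rw [List.cons_append, List.cons_append, List.dropWhile_cons, if_neg (by simp [hd])]]
    unfold PySem.Chars.rstrip
    rw [List.reverse_append, show ([c] : List Char).reverse = [c] from rfl,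
      show ([c] : List Char) ++ ((d :: w') ++ p).reverse = c :: ((d :: w') ++ p).reverse from rfl,
      List.dropWhile_cons, if_neg (by simp [hc])]
    simp

lemma pvStrip_idem (l : List Char) :
    PySem.Chars.strip (PySem.Chars.strip l) = PySem.Chars.strip l := by
  have hpre : PySem.Chars.rstrip (PySem.Chars.lstrip l) <+: PySem.Chars.lstrip l := by
    have h1 : List.dropWhile PySem.Chars.isspace (PySem.Chars.lstrip l).reverse
        <:+ (PySem.Chars.lstrip l).reverse := List.dropWhile_suffix _
    have h2 := h1.reverse
    simpa [PySem.Chars.rstrip] using h2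
  have hl : PySem.Chars.lstrip (PySem.Chars.rstrip (PySem.Chars.lstrip l))
      = PySem.Chars.rstrip (PySem.Chars.lstrip l) := by
    cases hz : PySem.Chars.rstrip (PySem.Chars.lstrip l) with
    | nil => rfl
    | cons e t =>
      rw [hz] at hpre
      obtain ⟨r, hr⟩ := hpre
      have hey : List.dropWhile PySem.Chars.isspace l = e :: (t ++ r) := by
        rw [show List.dropWhile PySem.Chars.isspace l = PySem.Chars.lstrip l from rfl, ← hr]
        simp
      have he : PySem.Chars.isspace e = false := pvHead_dropWhile _ _ _ _ hey
      unfold PySem.Chars.lstrip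
      rw [List.dropWhile_cons, if_neg (by simp [he])]
  show PySem.Chars.rstrip (PySem.Chars.lstrip (PySem.Chars.rstrip (PySem.Chars.lstrip l)))
      = PySem.Chars.rstrip (PySem.Chars.lstrip l)
  rw [hl]
  apply pvRstrip_of_last
  intro e he
  rw [show PySem.Chars.rstrip (PySem.Chars.lstrip l)
      = (List.dropWhile PySem.Chars.isspace (PySem.Chars.lstrip l).reverse).reverse from rfl,
    List.getLast?_reverse] at he
  cases hdw : List.dropWhile PySem.Chars.isspace (PySem.Chars.lstrip l).reverse with
  | nil => rw [hdw] at he; simp at he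
  | cons e' t =>
    rw [hdw] at he
    obtain rfl : e' = e := by simpa using he
    exact pvHead_dropWhile _ _ _ _ hdw

lemma pvStrip_eq_lstrip (r : List Char)
    (h : ∀ e ∈ r.getLast?, PySem.Chars.isspace e = false) :
    PySem.Chars.strip r = PySem.Chars.lstrip r := by
  show PySem.Chars.rstrip (PySem.Chars.lstrip r) = PySem.Chars.lstrip r
  apply pvRstrip_of_last
  intro e he
  obtain ⟨pre, hpre⟩ : PySem.Chars.lstrip r <:+ r := List.dropWhile_suffix _
  have hne : PySem.Chars.lstrip r ≠ [] := by
    intro hn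
    rw [hn] at he
    simp at he
  apply h
  rw [← hpre, List.getLast?_append_of_ne_nil pre hne]
  exact he

-- splitMax?.go facts for A's q.split('.', 1)
lemma go_m0 (sep : List Char) : ∀ (fuel : Nat) (l cur : List Char) (acc : List (List Char)),
    PySem.Chars.splitOnMax.go sep fuel 0 l cur acc = ((cur.reverse ++ l) :: acc).reverse := by
  intro fuel l cur acc
  cases fuel with
  | zero => simp [PySem.Chars.splitOnMax.go]
  | succ n => cases l with
    | nil => simp [PySem.Chars.splitOnMax.go]
    | cons c rest => simp [PySem.Chars.splitOnMax.go]

lemma split1 (c s : Char) (rest : List Char) (h : c ≠ s) :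
    PySem.Chars.splitOnMax (c :: s :: rest) [s] 1 = [[c], rest] := by
  simp [PySem.Chars.splitOnMax, PySem.Chars.splitOnMax.go, List.isPrefixOf, Ne.symm h, go_m0]

lemma split_two (q : String) (c0 s : Char) (rest : List Char) (sep : String)
    (hq : q.toList = c0 :: s :: rest) (hsep : sep.toList = [s]) (hne : c0 ≠ s) :
    (((PySem.Str.splitMax? q sep 1).getD [])[1]?).getD "" = String.ofList rest := by
  rw [PySem.Str.splitMax?, PySem.Chars.splitMax?, hq, hsep, if_neg (by simp),
    split1 c0 s rest hne]
  rfl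

lemma prefA : (PySem.List.pyRange 1 10 1).map (fun i => PySem.Int.toStr i ++ ".") =
    ["1.","2.","3.","4.","5.","6.","7.","8.","9."] := by decide

lemma prefB : (PySem.List.pyRange 1 10 1).map (fun i => PySem.Int.toStr i ++ ")") =
    ["1)","2)","3)","4)","5)","6)","7)","8)","9)"] := by decide

lemma condA_dot (q : String) (c0 c1 : Char) (rest : List Char) (hq : q.toList = c0::c1::rest) :
    ((["1.","2.","3.","4.","5.","6.","7.","8.","9."] : List String).any
        (fun p => PySem.Str.startswith q p) = true) ↔
      ((c0='1'∨c0='2'∨c0='3'∨c0='4'∨c0='5'∨c0='6'∨c0='7'∨c0='8'∨c0='9') ∧ c1='.') := by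
  simp only [List.any_cons, List.any_nil, Bool.or_eq_true, Bool.false_eq_true, or_false,
    PySem.Str.startswith, PySem.Chars.startswith_iff,
    show ("1.":String).toList = ['1','.'] from rfl, show ("2.":String).toList = ['2','.'] from rfl,
    show ("3.":String).toList = ['3','.'] from rfl, show ("4.":String).toList = ['4','.'] from rfl,
    show ("5.":String).toList = ['5','.'] from rfl, show ("6.":String).toList = ['6','.'] from rfl,
    show ("7.":String).toList = ['7','.'] from rfl, show ("8.":String).toList = ['8','.'] from rfl,
    show ("9.":String).toList = ['9','.'] from rfl, hq,
    List.cons_prefix_cons, List.nil_prefix, and_true]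
  constructor
  · rintro (h|h|h|h|h|h|h|h|h) <;> exact ⟨by simp [h.1.symm], h.2.symm⟩
  · rintro ⟨h, rfl⟩
    rcases h with rfl|rfl|rfl|rfl|rfl|rfl|rfl|rfl|rfl <;> simp

lemma condA_par (q : String) (c0 c1 : Char) (rest : List Char) (hq : q.toList = c0::c1::rest) :
    ((["1)","2)","3)","4)","5)","6)","7)","8)","9)"] : List String).any
        (fun p => PySem.Str.startswith q p) = true) ↔
      ((c0='1'∨c0='2'∨c0='3'∨c0='4'∨c0='5'∨c0='6'∨c0='7'∨c0='8'∨c0='9') ∧ c1=')') := by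
  simp only [List.any_cons, List.any_nil, Bool.or_eq_true, Bool.false_eq_true, or_false,
    PySem.Str.startswith, PySem.Chars.startswith_iff,
    show ("1)":String).toList = ['1',')'] from rfl, show ("2)":String).toList = ['2',')'] from rfl,
    show ("3)":String).toList = ['3',')'] from rfl, show ("4)":String).toList = ['4',')'] from rfl,
    show ("5)":String).toList = ['5',')'] from rfl, show ("6)":String).toList = ['6',')'] from rfl,
    show ("7)":String).toList = ['7',')'] from rfl, show ("8)":String).toList = ['8',')'] from rfl,
    show ("9)":String).toList = ['9',')'] from rfl, hq,
    List.cons_prefix_cons, List.nil_prefix, and_true]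
  constructor
  · rintro (h|h|h|h|h|h|h|h|h) <;> exact ⟨by simp [h.1.symm], h.2.symm⟩
  · rintro ⟨h, rfl⟩
    rcases h with rfl|rfl|rfl|rfl|rfl|rfl|rfl|rfl|rfl <;> simp

lemma pvIsIn_single (a : Char) (l : List Char) :
    PySem.Chars.isIn [a] l = true ↔ a ∈ l := by
  rw [PySem.Chars.isIn_iff_infix]
  constructor
  · intro h
    exact (List.singleton_sublist).mp h.sublist
  · intro h
    obtain ⟨s, t, rfl⟩ := List.mem_iff_append.mp h
    exact ⟨s, t, by simp⟩

lemma pvSliceL (c0 c1 : Char) (rest : List Char) :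
    PySem.List.slice (c0 :: c1 :: rest) (some 2) none = rest := by
  rw [show ((2:Int)) = ((2:Nat):Int) from rfl, PySem.List.slice_from_natCast]
  rfl

lemma pvStr_strip_ofList (l : List Char) :
    PySem.Str.strip (String.ofList l) = String.ofList (PySem.Chars.strip l) := by
  rw [show PySem.Str.strip (String.ofList l)
      = String.ofList (PySem.Chars.strip (String.ofList l).toList) from rfl,
    String.toList_ofList]

lemma pvOfList_eq_empty (l : List Char) : String.ofList l = "" ↔ l = [] := by
  rw [← String.toList_inj, String.toList_ofList]
  rfl

-- per-line agreement on stripped lines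
lemma pvClean_eq (s : List Char) (hs : PySem.Chars.strip s = s) :
    pvCleanA (String.ofList s) = pvStripMarker s := by
  unfold pvCleanA pvStripMarker
  rw [prefA, prefB]
  rcases s with _ | ⟨c0, tl⟩
  · rw [if_neg, if_neg, if_neg]
    · rintro ⟨hlen, -⟩
      simp [PySem.Chars.len] at hlen
    · simp [PySem.Str.startswith, PySem.Chars.startswith_iff]
    · simp [PySem.Str.startswith, PySem.Chars.startswith_iff]
  · rcases tl with _ | ⟨c1, rest⟩
    · rw [if_neg, if_neg, if_neg]
      · rintro ⟨hlen, -⟩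
        simp [PySem.Chars.len] at hlen
      · simp [PySem.Str.startswith, PySem.Chars.startswith_iff, List.cons_prefix_cons]
      · simp [PySem.Str.startswith, PySem.Chars.startswith_iff, List.cons_prefix_cons]
    · have hq : (String.ofList (c0 :: c1 :: rest)).toList = c0 :: c1 :: rest :=
        String.toList_ofList
      have hg0 : (PySem.List.pyGet? (c0 :: c1 :: rest) 0).getD ' ' = c0 := by
        simp [PySem.List.pyGet?, PySem.List.pyIdx?,
          show (0:Int) ≤ (rest.length:Int) + 1 from by positivity]
      have hg1 : (PySem.List.pyGet? (c0 :: c1 :: rest) 1).getD ' ' = c1 := by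
        simp [PySem.List.pyGet?, PySem.List.pyIdx?,
          show (0:Int) ≤ (rest.length:Int) from by positivity]
      have hlen : 2 ≤ PySem.Chars.len (c0 :: c1 :: rest) := by
        simp only [PySem.Chars.len]
        push_cast [List.length_cons]
        omega
      have hdigB : (PySem.Chars.isIn [c0] ['1','2','3','4','5','6','7','8','9'] = true) ↔
          (c0='1'∨c0='2'∨c0='3'∨c0='4'∨c0='5'∨c0='6'∨c0='7'∨c0='8'∨c0='9') := by
        rw [pvIsIn_single]
        simp
      have hdelB : (PySem.Chars.isIn [c1] ['.', ')'] = true) ↔ (c1='.' ∨ c1=')') := by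
        rw [pvIsIn_single]
        simp
      have hrest : PySem.Chars.strip rest = PySem.Chars.lstrip rest := by
        apply pvStrip_eq_lstrip
        intro e he
        have hlast := pvLast_not_space _ (pvStripped_rstrip _ hs)
        cases rest with
        | nil => simp at he
        | cons r rs =>
          apply hlast
          rw [show c0 :: c1 :: (r :: rs) = [c0, c1] ++ (r :: rs) from rfl,
            List.getLast?_append_of_ne_nil [c0, c1] (by simp)]
          exact he
      by_cases hdot : c1 = '.'
      · by_cases hdig : (c0='1'∨c0='2'∨c0='3'∨c0='4'∨c0='5'∨c0='6'∨c0='7'∨c0='8'∨c0='9')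
        · rw [if_pos ((condA_dot _ c0 c1 rest hq).mpr ⟨hdig, hdot⟩),
            if_pos ⟨hlen, by rw [hg0]; exact hdigB.mpr hdig,
              by rw [hg1]; exact hdelB.mpr (Or.inl hdot)⟩]
          have hc0 : c0 ≠ '.' := by
            rintro rfl
            rcases hdig with h|h|h|h|h|h|h|h|h <;> exact absurd h (by decide)
          rw [split_two _ c0 '.' rest "." (by rw [hq, hdot]) rfl hc0, pvSliceL,
            pvStr_strip_ofList, hrest]
        · rw [if_neg (fun h => hdig ((condA_dot _ c0 c1 rest hq).mp h).1),
            if_neg (fun h => hdig ((condA_par _ c0 c1 rest hq).mp h).1),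
            if_neg]
          rintro ⟨-, hd, -⟩
          rw [hg0] at hd
          exact hdig (hdigB.mp hd)
      · by_cases hpar : c1 = ')'
        · by_cases hdig : (c0='1'∨c0='2'∨c0='3'∨c0='4'∨c0='5'∨c0='6'∨c0='7'∨c0='8'∨c0='9')
          · rw [if_neg (fun h => hdot ((condA_dot _ c0 c1 rest hq).mp h).2),
              if_pos ((condA_par _ c0 c1 rest hq).mpr ⟨hdig, hpar⟩),
              if_pos ⟨hlen, by rw [hg0]; exact hdigB.mpr hdig,
                by rw [hg1]; exact hdelB.mpr (Or.inr hpar)⟩]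
            have hc0 : c0 ≠ ')' := by
              rintro rfl
              rcases hdig with h|h|h|h|h|h|h|h|h <;> exact absurd h (by decide)
            rw [split_two _ c0 ')' rest ")" (by rw [hq, hpar]) rfl hc0, pvSliceL,
              pvStr_strip_ofList, hrest]
          · rw [if_neg (fun h => hdig ((condA_dot _ c0 c1 rest hq).mp h).1),
              if_neg (fun h => hdig ((condA_par _ c0 c1 rest hq).mp h).1),
              if_neg]
            rintro ⟨-, hd, -⟩
            rw [hg0] at hd
            exact hdig (hdigB.mp hd)
        · rw [if_neg (fun h => hdot ((condA_dot _ c0 c1 rest hq).mp h).2),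
            if_neg (fun h => hpar ((condA_par _ c0 c1 rest hq).mp h).2),
            if_neg]
          rintro ⟨-, -, hin⟩
          rw [hg1] at hin
          rcases hdelB.mp hin with h | h
          · exact hdot h
          · exact hpar h

lemma foldA (xs : List String) : ∀ (acc : List String),
    xs.foldl (fun cleaned_questions q =>
      if ((PySem.List.pyRange 1 10 1).map (fun i => PySem.Int.toStr i ++ ".")).any
           (fun p => PySem.Str.startswith q p) then
        cleaned_questions ++
          [PySem.Str.strip ((((PySem.Str.splitMax? q "." 1).getD [])[1]?).getD "")]
      else if ((PySem.List.pyRange 1 10 1).map (fun i => PySem.Int.toStr i ++ ")")).any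
           (fun p => PySem.Str.startswith q p) then
        cleaned_questions ++
          [PySem.Str.strip ((((PySem.Str.splitMax? q ")" 1).getD [])[1]?).getD "")]
      else
        cleaned_questions ++ [q]) acc = acc ++ xs.map pvCleanA := by
  induction xs with
  | nil => intro acc; simp
  | cons x xs ih =>
    intro acc
    rw [List.foldl_cons, List.map_cons, ih]
    have hx : (if ((PySem.List.pyRange 1 10 1).map (fun i => PySem.Int.toStr i ++ ".")).any
           (fun p => PySem.Str.startswith x p) then
        acc ++ [PySem.Str.strip ((((PySem.Str.splitMax? x "." 1).getD [])[1]?).getD "")]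
      else if ((PySem.List.pyRange 1 10 1).map (fun i => PySem.Int.toStr i ++ ")")).any
           (fun p => PySem.Str.startswith x p) then
        acc ++ [PySem.Str.strip ((((PySem.Str.splitMax? x ")" 1).getD [])[1]?).getD "")]
      else acc ++ [x]) = acc ++ [pvCleanA x] := by
      unfold pvCleanA
      split_ifs <;> rfl
    rw [hx]
    simp

lemma pvPipeline (ls : List (List Char)) :
    ((((ls.map String.ofList).filter
        (fun q => PySem.Str.strip q ≠ "")).map PySem.Str.strip)).map pvCleanA = pvResA ls := by
  induction ls with
  | nil => rfl
  | cons l ls ih =>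
    by_cases h : PySem.Chars.strip l = []
    · simpa [pvResA, List.filterMap_cons, List.filter_cons, pvStr_strip_ofList,
        pvOfList_eq_empty, h] using ih
    · simpa [pvResA, List.filterMap_cons, List.filter_cons, pvStr_strip_ofList,
        pvOfList_eq_empty, h] using ih

lemma pvA_eq (t : String) :
    parse_questions_from_text t = pvResA (pvSSplit '\n' [] t.toList) := by
  by_cases ht : t = ""
  · subst ht
    rfl
  · unfold parse_questions_from_text
    rw [if_neg ht, foldA,
      show (PySem.Str.split? t "\n").getD []
        = (PySem.Chars.splitOn t.toList ['\n']).map String.ofList from rfl,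
      pvSplitOn_eq, List.nil_append, pvPipeline]

lemma pvResB_cons (l : List Char) (ls : List (List Char)) :
    pvResB (l :: ls) = (if PySem.Chars.strip l = [] then []
      else [pvStripMarker (PySem.Chars.strip l)]) ++ pvResB ls := by
  by_cases h : PySem.Chars.strip l = [] <;> simp [pvResB, h]

lemma pvBGo_inv : ∀ (cs junk : List Char) (out : List String) (word pend : List Char),
    (∀ x ∈ junk, PySem.Chars.isspace x = true) → (∀ x ∈ pend, PySem.Chars.isspace x = true) →
    PySem.Chars.strip word = word → (word = [] → pend = []) →
    pvBGo cs out word pend = out ++ pvResB (pvSSplit '\n' (junk ++ word ++ pend) cs) := by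
  intro cs
  induction cs with
  | nil =>
    intro junk out word pend hj hp hw h0
    show (if word ≠ [] then out ++ [pvStripMarker word] else out) = _
    rw [show pvSSplit '\n' (junk ++ word ++ pend) [] = [junk ++ word ++ pend] from rfl,
      pvResB_cons, pvStrip_flush junk word pend hj hp hw]
    by_cases hwn : word = [] <;> simp [hwn, pvResB]
  | cons c cs ih =>
    intro junk out word pend hj hp hw h0
    simp only [pvBGo]
    by_cases hc : c = '\n'
    · subst hc
      rw [if_pos rfl,
        ih [] (if word ≠ [] then out ++ [pvStripMarker word] else out) [] []
          (by simp) (by simp) rfl (fun _ => rfl),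
        show pvSSplit '\n' (junk ++ word ++ pend) ('\n' :: cs)
          = (junk ++ word ++ pend) :: pvSSplit '\n' [] cs from by
            simp [pvSSplit],
        pvResB_cons, pvStrip_flush junk word pend hj hp hw]
      by_cases hwn : word = [] <;> simp [hwn]
    · rw [if_neg hc]
      have hsp : pvSSplit '\n' (junk ++ word ++ pend) (c :: cs)
          = pvSSplit '\n' ((junk ++ word ++ pend) ++ [c]) cs := by
        simp only [pvSSplit]
        rw [if_neg hc]
      by_cases hspace : PySem.Chars.isspace c = true
      · rw [if_pos hspace]
        by_cases hwn : word = []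
        · have hp0 : pend = [] := h0 hwn
          subst hwn
          subst hp0
          rw [if_neg (by simp),
            ih (junk ++ [c]) out [] []
              (by
                intro x hx
                rcases List.mem_append.mp hx with h | h
                · exact hj x h
                · simp at h
                  subst h
                  exact hspace)
              (by simp) rfl (fun _ => rfl),
            hsp]
          simp
        · rw [if_pos hwn,
            ih junk out word (pend ++ [c]) hj
              (by
                intro x hx
                rcases List.mem_append.mp hx with h | h
                · exact hp x h
                · simp at h
                  subst h
                  exact hspace)
              hw (fun h => absurd h hwn),
            hsp]
          simp
      · rw [if_neg hspace]
        have hcf : PySem.Chars.isspace c = false := by simpa using hspace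
        rw [ih junk out (word ++ (pend ++ [c])) [] hj (by simp)
            (by
              have := pvStrip_extend word pend c hw h0 hcf
              simpa [List.append_assoc] using this)
            (by intro hz; simp at hz),
          hsp]
        simp

lemma pvRes_eq (ls : List (List Char)) : pvResA ls = pvResB ls := by
  unfold pvResA pvResB
  induction ls with
  | nil => rfl
  | cons l ls ih =>
    simp only [List.filterMap_cons]
    by_cases h : PySem.Chars.strip l = []
    · simp [h, ih]
    · simp [h, ih, pvClean_eq (PySem.Chars.strip l) (pvStrip_idem l)]

-- ===== VERDICT (by name: the statement is the Claim_ definition above) =====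
theorem parse_questions_from_text_spec : Claim_equal_parse_questions_from_text := by
  unfold Claim_equal_parse_questions_from_text Spec_parse_questions_from_text
  intro t _
  rw [pvA_eq, pvRes_eq]
  unfold parse_questions_from_text_alt
  rw [pvBGo_inv t.toList [] [] [] [] (by simp) (by simp) rfl (fun _ => rfl)]
  simp
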